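-- pv_equiv track=rewrite | github.com/bond-lab/Language-and-the-Computer | docs/code/wk8b.py | dec_freq1
-- ===== SOURCE A (Python) =====
-- def dec_freq1(liszt):
--     """
--     take a list and returns a list of types in decreasing frequency
--     """
--     freq = dict()
--     for l in liszt:
--         if l in freq:
--            freq[l] += 1
--         else:
--            freq[l] = 1
--     return sorted(freq.keys(), key=lambda x: freq[x], reverse=True)
-- ===== SOURCE B (Python) =====
-- def dec_freq1(liszt):
--     """
--     take a list and returns a list of types in decreasing frequency
--     """
--     freq = {}
--     for l in liszt:
--         freq[l] = freq.get(l, 0) + 1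
--     buckets = {}
--     for w, c in freq.items():
--         buckets.setdefault(c, []).append(w)
--     out = []
--     for c in range(max(freq.values(), default=0), 0, -1):
--         out.extend(buckets.get(c, []))
--     return out
-- ===== Notes on version B (the rewrite author's own statement) =====
-- stated objective: alternative
-- what changed: Replaces the comparison sort of the keys by descending frequency with a linear bucket/counting sort: keys are appended to buckets indexed by their count and the buckets are concatenated from the maximum count down to 1.
import Mathlib
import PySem

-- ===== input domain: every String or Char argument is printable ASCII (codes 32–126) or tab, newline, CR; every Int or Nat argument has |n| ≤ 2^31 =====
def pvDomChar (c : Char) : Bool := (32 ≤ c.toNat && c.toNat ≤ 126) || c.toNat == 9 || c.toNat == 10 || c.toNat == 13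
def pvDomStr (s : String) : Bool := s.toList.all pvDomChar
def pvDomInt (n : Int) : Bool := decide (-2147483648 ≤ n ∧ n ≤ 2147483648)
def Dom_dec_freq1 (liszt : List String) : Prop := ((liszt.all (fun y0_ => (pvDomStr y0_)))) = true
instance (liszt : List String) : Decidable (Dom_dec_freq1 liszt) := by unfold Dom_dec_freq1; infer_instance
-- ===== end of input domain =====

-- B replaces A's stable reverse comparison-sort of the keys by a bucket/counting sort over
-- the frequency values (objective: alternative algorithm; return value proved identical).


-- ===== PORT A =====
-- 'freq[l] += 1' only runs under 'l in freq', so getD with default 0 is exact there.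
def dec_freq1 (liszt : List String) : List String :=
  let freq := liszt.foldl
    (fun d l => if d.contains l then d.insert l (d.getD l 0 + 1) else d.insert l 1)
    (PySem.Dict.empty : PySem.Dict String Int)
  PySem.List.sorted freq.keys (fun x => freq.getD x 0) true

-- ===== PORT B =====
def dec_freq1_alt (liszt : List String) : List String :=
  let freq := liszt.foldl (fun d l => d.modify l 0 (· + 1))
    (PySem.Dict.empty : PySem.Dict String Int)
  let buckets := freq.items.foldl (fun b p => b.modify p.2 [] (· ++ [p.1]))
    (PySem.Dict.empty : PySem.Dict Int (List String))
  let m := PySem.List.maxD freq.values (fun v => v) 0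
  (PySem.List.pyRange m 0 (-1)).foldl (fun acc c => acc ++ buckets.getD c []) []


-- ===== PRECONDITION & SPEC =====
def Spec_dec_freq1 (liszt : List String) (out : List String) : Prop := out = dec_freq1_alt liszt
instance (liszt : List String) (out : List String) : Decidable (Spec_dec_freq1 liszt out) := by unfold Spec_dec_freq1; infer_instance

-- ===== CLAIM (what is proved, stated in full; the proofs are below) =====
def Claim_equal_dec_freq1 : Prop := ∀ (liszt : List String), Dom_dec_freq1 liszt → Spec_dec_freq1 liszt (dec_freq1 liszt)

-- ===== LEMMAS AND PROOFS =====
theorem freq_step_eq :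
    (fun (d : PySem.Dict String Int) (l : String) =>
      if d.contains l then d.insert l (d.getD l 0 + 1) else d.insert l 1) =
    (fun (d : PySem.Dict String Int) (l : String) => d.modify l 0 (· + 1)) := by
  funext d l
  by_cases h : d.contains l
  · simp [h, PySem.Dict.modify]
  · rw [if_neg h, PySem.Dict.modify,
      PySem.Dict.getD_of_not_contains d 0 (by simpa using h)]
    norm_num

theorem pyRange_down (m : Int) (hm : 0 ≤ m) :
    PySem.List.pyRange m 0 (-1) = (List.range m.toNat).map (fun k : Nat => m - (k : Int)) := by
  simp only [PySem.List.pyRange]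
  rw [if_neg (by norm_num), if_neg (by norm_num)]
  rcases eq_or_lt_of_le hm with h | h
  · rw [if_neg (by omega)]
    simp [← h]
  · rw [if_pos h]
    have : ((m - 0 + - -1 - 1) / - -1).toNat = m.toNat := by
      norm_num
    rw [this]
    apply List.map_congr_left
    intro k _
    ring

theorem pyRange_down_pairwise (m : Int) (hm : 0 ≤ m) :
    (PySem.List.pyRange m 0 (-1)).Pairwise (fun a b => b < a) := by
  rw [pyRange_down m hm]
  refine List.Pairwise.map _ ?_ List.pairwise_lt_range
  intro a b hab
  omega

theorem mem_pyRange_down (m v : Int) (hm : 0 ≤ m) :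
    v ∈ PySem.List.pyRange m 0 (-1) ↔ 1 ≤ v ∧ v ≤ m := by
  rw [pyRange_down m hm]
  simp only [List.mem_map, List.mem_range]
  constructor
  · rintro ⟨k, hk, rfl⟩; omega
  · rintro ⟨h1, h2⟩; exact ⟨(m - v).toNat, by omega, by omega⟩

theorem insertBy_append {α : Type} (before : α → α → Bool) (x : α) (ys zs : List α)
    (h1 : ∀ y ∈ ys, before x y = false) (h2 : ∀ y ∈ zs, before x y = true) :
    PySem.List.insertBy before x (ys ++ zs) = ys ++ x :: zs := by
  induction ys with
  | nil =>
    cases zs with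
    | nil => simp [PySem.List.insertBy]
    | cons z zs => simp [PySem.List.insertBy, h2 z (by simp)]
  | cons y ys ih =>
    have hy := h1 y (by simp)
    simp only [List.cons_append, PySem.List.insertBy, hy]
    simp [ih (fun y hy => h1 y (by simp [hy]))]

theorem sorted_rev_eq_flatMap_filter {α : Type} (C : List Int) (f : α → Int)
    (hC : C.Pairwise (fun a b => b < a)) (ks : List α) (hk : ∀ a ∈ ks, f a ∈ C) :
    PySem.List.sorted ks f true = C.flatMap (fun c => ks.filter (fun a => f a == c)) := by
  rw [PySem.List.sorted_rev_eq_foldl_insertBy]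
  induction ks using List.reverseRecOn with
  | nil => simp
  | append_singleton ks x ih =>
    rw [List.foldl_append, List.foldl_cons, List.foldl_nil,
      ih (fun a ha => hk a (by simp [ha]))]
    obtain ⟨C1, C2, hCsplit⟩ := List.append_of_mem (hk x (by simp))
    subst hCsplit
    rw [List.pairwise_append] at hC
    obtain ⟨hp1, hp2, hcross⟩ := hC
    rw [List.pairwise_cons] at hp2
    obtain ⟨hlt, -⟩ := hp2
    have hC1 : ∀ c ∈ C1, f x < c := fun c hc => hcross c hc (f x) (by simp)
    have hfil : ∀ (c : Int), c ≠ f x →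
        (ks ++ [x]).filter (fun a => f a == c) = ks.filter (fun a => f a == c) := by
      intro c hc
      rw [List.filter_append]
      simp [Ne.symm hc]
    have hfilx : (ks ++ [x]).filter (fun a => f a == f x) =
        ks.filter (fun a => f a == f x) ++ [x] := by
      rw [List.filter_append]; simp
    rw [List.flatMap_append, List.flatMap_cons, List.flatMap_append, List.flatMap_cons,
      hfilx, List.flatMap_congr (g := fun c => ks.filter (fun a => f a == c))
        (fun c hc => hfil c (by have := hC1 c hc; omega)),
      List.flatMap_congr (l := C2) (g := fun c => ks.filter (fun a => f a == c))
        (fun c hc => hfil c (by have := hlt c hc; omega))]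
    rw [← List.append_assoc, ← List.append_assoc,
      insertBy_append _ x _ _ ?_ ?_]
    · simp
    · intro y hy
      simp only [List.mem_append, List.mem_flatMap, List.mem_filter, beq_iff_eq] at hy
      rcases hy with ⟨c, hc, -, rfl⟩ | ⟨-, hfy⟩
      · have := hC1 _ hc
        simp; omega
      · simp [hfy]
    · intro y hy
      simp only [List.mem_flatMap, List.mem_filter, beq_iff_eq] at hy
      obtain ⟨c, hc, -, rfl⟩ := hy
      have := hlt _ hc
      simp; omega

theorem buckets_getD (l : List (String × Int)) (b : PySem.Dict Int (List String)) (c : Int) :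
    (l.foldl (fun b p => b.modify p.2 [] (· ++ [p.1])) b).getD c [] =
      b.getD c [] ++ (l.filter (fun p => p.2 == c)).map (·.1) := by
  induction l generalizing b with
  | nil => simp
  | cons p l ih =>
    simp only [List.foldl_cons, ih, List.filter_cons]
    by_cases h : p.2 = c
    · subst h; simp [PySem.Dict.getD_modify_self]
    · simp [PySem.Dict.getD_modify, h, Ne.symm h]

theorem dec_freq1_main (liszt : List String) : dec_freq1 liszt = dec_freq1_alt liszt := by
  simp only [dec_freq1, dec_freq1_alt, freq_step_eq]
  set F := liszt.foldl (fun d l => d.modify l 0 (· + 1))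
    (PySem.Dict.empty : PySem.Dict String Int) with hF
  set m := PySem.List.maxD F.values (fun v => v) 0 with hm
  have hnd : F.keys.Nodup := by
    rw [hF]
    exact PySem.Dict.nodup_keys_foldl_modify_key liszt (fun x => x) 0
      (fun _ _ => (· + 1)) _ (by simp)
  have hcount : ∀ k, F.getD k 0 = (liszt.count k : Int) := by
    intro k
    rw [hF, PySem.Dict.getD_foldl_modify_add_one]
    simp [PySem.Dict.getD_empty]
  have hmemk : ∀ k, k ∈ F.keys ↔ k ∈ liszt := by
    intro k
    rw [hF, PySem.Dict.keys_foldl_modify]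
    simp [PySem.Set.mem_update, PySem.Dict.keys_empty]
  have hpos : ∀ k ∈ F.keys, 1 ≤ F.getD k 0 := by
    intro k hk
    rw [hcount]
    have : 0 < liszt.count k := List.count_pos_iff.mpr ((hmemk k).mp hk)
    omega
  have hvals : F.values = F.keys.map (fun k => F.getD k 0) :=
    PySem.Dict.values_eq_map_keys F hnd 0
  have hle : ∀ k ∈ F.keys, F.getD k 0 ≤ m := by
    intro k hk
    rcases h : PySem.List.max? F.values (fun v => v) with _ | mv
    · rw [PySem.List.max?_eq_none_iff] at h
      rw [hvals] at h
      simp at h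
      rw [h] at hk
      simp at hk
    · have hmax := PySem.List.max?_isMax h
      have : F.getD k 0 ∈ F.values := by
        rw [hvals]; exact List.mem_map_of_mem hk
      have := hmax _ this
      simp only [hm, PySem.List.maxD, h, Option.getD_some]
      exact this
  have hm0 : 0 ≤ m := by
    rcases h : PySem.List.max? F.values (fun v => v) with _ | mv
    · simp [hm, PySem.List.maxD, h]
    · have hmem := PySem.List.max?_mem h
      rw [hvals] at hmem
      obtain ⟨k, hk, rfl⟩ := List.mem_map.mp hmem
      have := hpos k hk
      simp only [hm, PySem.List.maxD, h, Option.getD_some]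
      omega
  rw [PySem.List.foldl_append_eq_flatMap, List.nil_append]
  have hrhs : ∀ c, ((F.items.foldl (fun b p => b.modify p.2 [] (· ++ [p.1]))
      (PySem.Dict.empty : PySem.Dict Int (List String))).getD c []) =
      F.keys.filter (fun k => F.getD k 0 == c) := by
    intro c
    rw [buckets_getD, PySem.Dict.getD_empty, List.nil_append,
      PySem.Dict.items_eq_map_keys F hnd 0, List.filter_map, List.map_map]
    simp [Function.comp_def]
  rw [List.flatMap_congr (fun c _ => hrhs c)]
  exact sorted_rev_eq_flatMap_filter _ _ (pyRange_down_pairwise m hm0) _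
    (fun a ha => (mem_pyRange_down m _ hm0).mpr ⟨hpos a ha, hle a ha⟩)

-- ===== VERDICT (by name: the statement is the Claim_ definition above) =====
theorem dec_freq1_spec : Claim_equal_dec_freq1 := by
  intro liszt _
  exact dec_freq1_main liszt
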